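-- pv_equiv track=rewrite | github.com/Varadmuley33/Interview-AI-Platform | Interview-Backend/src/scripts/generate_dataset.py | generate_sample_questions
-- ===== SOURCE A (Python) =====
-- from typing import List, Dict, Any
--
-- def generate_sample_questions(count: int) -> List[str]:
--     """Generate sample questions for testing."""
--     base_questions = [
--         "Tell me about a complex system you designed and the challenges you faced",
--         "How do you approach debugging a production issue under time pressure?",
--         "Describe your experience with microservices architecture",
--         "How do you ensure code quality in a team setting?",
--         "Tell me about a time you had to learn a new technology quickly",
--         "How do you handle technical debt in your projects?",
--         "Describe your approach to API design and versioning",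
--         "How do you optimize database queries for performance?",
--         "Tell me about your experience with CI/CD pipelines and DevOps",
--         "How do you approach system scalability and load balancing?",
--         "Describe a situation where you had to refactor legacy code",
--         "How do you implement security best practices in your applications?",
--         "Tell me about your experience with cloud platforms like AWS or GCP",
--         "How do you approach testing in your development workflow?",
--         "Describe your experience with containerization and Kubernetes",
--         "How do you handle version control and code review processes?",
--         "Tell me about a time you mentored junior developers",
--         "How do you stay updated with new technologies and trends?",
--         "Describe your approach to monitoring and logging in production",
--         "How do you balance technical excellence with business requirements?"
--     ]
--
--     # Cycle through base questions to reach desired count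
--     questions = []
--     for i in range(count):
--         base = base_questions[i % len(base_questions)]
--         if i >= len(base_questions):
--             # Add variation for duplicates
--             questions.append(f"{base} (Variation {i // len(base_questions)})")
--         else:
--             questions.append(base)
--
--     return questions[:count]
-- ===== SOURCE B (Python) =====
-- from typing import List, Dict, Any
--
-- def generate_sample_questions(count: int) -> List[str]:
--     """Generate sample questions for testing."""
--     base_questions = [
--         "Tell me about a complex system you designed and the challenges you faced",
--         "How do you approach debugging a production issue under time pressure?",
--         "Describe your experience with microservices architecture",
--         "How do you ensure code quality in a team setting?",
--         "Tell me about a time you had to learn a new technology quickly",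
--         "How do you handle technical debt in your projects?",
--         "Describe your approach to API design and versioning",
--         "How do you optimize database queries for performance?",
--         "Tell me about your experience with CI/CD pipelines and DevOps",
--         "How do you approach system scalability and load balancing?",
--         "Describe a situation where you had to refactor legacy code",
--         "How do you implement security best practices in your applications?",
--         "Tell me about your experience with cloud platforms like AWS or GCP",
--         "How do you approach testing in your development workflow?",
--         "Describe your experience with containerization and Kubernetes",
--         "How do you handle version control and code review processes?",
--         "Tell me about a time you mentored junior developers",
--         "How do you stay updated with new technologies and trends?",
--         "Describe your approach to monitoring and logging in production",
--         "How do you balance technical excellence with business requirements?"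
--     ]
--
--     if count <= 0:
--         return []
--     n = len(base_questions)
--     cycles = (count + n - 1) // n
--     blocks = [
--         q if c == 0 else f"{q} (Variation {c})"
--         for c in range(cycles)
--         for q in base_questions
--     ]
--     return blocks[:count]
-- ===== Notes on version B (the rewrite author's own statement) =====
-- stated objective: alternative
-- what changed: Replaces A's flat loop over range(count) with modulo indexing and per-item i//n variation numbering by a block-by-block construction: a two-level comprehension emits whole variation cycles (plain block, then '(Variation c)' blocks) and a final [:count] slice trims to length.
import Mathlib
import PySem

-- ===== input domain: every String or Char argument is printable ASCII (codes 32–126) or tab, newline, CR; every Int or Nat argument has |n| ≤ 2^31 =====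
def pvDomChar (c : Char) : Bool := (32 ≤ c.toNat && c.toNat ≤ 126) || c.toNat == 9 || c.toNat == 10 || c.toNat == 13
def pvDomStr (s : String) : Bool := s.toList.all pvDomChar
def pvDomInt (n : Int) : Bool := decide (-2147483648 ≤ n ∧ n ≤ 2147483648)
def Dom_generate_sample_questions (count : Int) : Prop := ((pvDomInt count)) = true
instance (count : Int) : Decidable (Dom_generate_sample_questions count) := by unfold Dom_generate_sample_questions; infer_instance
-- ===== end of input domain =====

-- B rebuilds the same sequence block-by-block (one list-comprehension pass over whole
-- variation cycles, then a [:count] slice) instead of A's flat modulo-indexed loop;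
-- objective: alternative decomposition, same cost.

-- the question list both Pythons carry verbatim (shared data, not logic)
def pvBaseQuestions : List String := [
  "Tell me about a complex system you designed and the challenges you faced",
  "How do you approach debugging a production issue under time pressure?",
  "Describe your experience with microservices architecture",
  "How do you ensure code quality in a team setting?",
  "Tell me about a time you had to learn a new technology quickly",
  "How do you handle technical debt in your projects?",
  "Describe your approach to API design and versioning",
  "How do you optimize database queries for performance?",
  "Tell me about your experience with CI/CD pipelines and DevOps",
  "How do you approach system scalability and load balancing?",
  "Describe a situation where you had to refactor legacy code",
  "How do you implement security best practices in your applications?",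
  "Tell me about your experience with cloud platforms like AWS or GCP",
  "How do you approach testing in your development workflow?",
  "Describe your experience with containerization and Kubernetes",
  "How do you handle version control and code review processes?",
  "Tell me about a time you mentored junior developers",
  "How do you stay updated with new technologies and trends?",
  "Describe your approach to monitoring and logging in production",
  "How do you balance technical excellence with business requirements?"]

-- ===== PORT A =====
-- flat loop over range(count); base_questions[i % len] is in range for i ≥ 0, so pyGetD "" is exact here
def generate_sample_questions (count : Int) : List String :=
  let questions : List String :=
    (PySem.List.pyRange 0 count 1).foldl (fun questions i =>
      let base := PySem.List.pyGetD pvBaseQuestions (PySem.Int.mod i (pvBaseQuestions.length : Int)) ""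
      if (pvBaseQuestions.length : Int) ≤ i then
        questions ++ [base ++ " (Variation " ++ PySem.Int.toStr (PySem.Int.floordiv i (pvBaseQuestions.length : Int)) ++ ")"]
      else
        questions ++ [base]) []
  PySem.List.slice questions none (some count)

-- ===== PORT B =====
def generate_sample_questions_alt (count : Int) : List String :=
  if count ≤ 0 then []
  else
    let n : Int := (pvBaseQuestions.length : Int)
    let cycles : Int := PySem.Int.floordiv (count + n - 1) n
    let blocks : List String :=
      (PySem.List.pyRange 0 cycles 1).flatMap (fun c =>
        pvBaseQuestions.map (fun q =>
          if c == 0 then q else q ++ " (Variation " ++ PySem.Int.toStr c ++ ")"))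
    PySem.List.slice blocks none (some count)

-- ===== PRECONDITION & SPEC =====
def Spec_generate_sample_questions (count : Int) (out : List String) : Prop := out = generate_sample_questions_alt count
instance (count : Int) (out : List String) : Decidable (Spec_generate_sample_questions count out) := by unfold Spec_generate_sample_questions; infer_instance

-- ===== CLAIM (what is proved, stated in full; the proofs are below) =====
def Claim_equal_generate_sample_questions : Prop := ∀ (count : Int), Dom_generate_sample_questions count → Spec_generate_sample_questions count (generate_sample_questions count)

-- ===== LEMMAS AND PROOFS =====

-- the value both programs put at position i (Nat form)
def pvQ (i : Nat) : String :=
  let base := pvBaseQuestions.getD (i % 20) ""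
  if 20 ≤ i then base ++ " (Variation " ++ PySem.Int.toStr ((i / 20 : Nat) : Int) ++ ")"
  else base

-- A's step expression as a function of the index (Int form, verbatim)
def pvQI (i : Int) : String :=
  let base := PySem.List.pyGetD pvBaseQuestions (PySem.Int.mod i (pvBaseQuestions.length : Int)) ""
  if (pvBaseQuestions.length : Int) ≤ i then
    base ++ " (Variation " ++ PySem.Int.toStr (PySem.Int.floordiv i (pvBaseQuestions.length : Int)) ++ ")"
  else base

lemma pvLen : pvBaseQuestions.length = 20 := rfl

lemma pvQI_cast (j : Nat) : pvQI (j : Int) = pvQ j := by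
  simp only [pvQI, pvQ, pvLen, PySem.Int.mod_natCast, PySem.Int.floordiv_natCast,
    PySem.List.pyGetD_natCast, Nat.cast_le]

lemma pvA_eq (k : Nat) :
    generate_sample_questions (k : Int) = List.take k ((List.range k).map pvQ) := by
  unfold generate_sample_questions
  have hf : (fun (questions : List String) (i : Int) =>
      let base := PySem.List.pyGetD pvBaseQuestions (PySem.Int.mod i (pvBaseQuestions.length : Int)) ""
      if (pvBaseQuestions.length : Int) ≤ i then
        questions ++ [base ++ " (Variation " ++ PySem.Int.toStr (PySem.Int.floordiv i (pvBaseQuestions.length : Int)) ++ ")"]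
      else questions ++ [base])
      = (fun (acc : List String) (i : Int) => acc ++ [pvQI i]) := by
    funext q i
    simp only [pvQI]
    split <;> rfl
  rw [hf, PySem.List.foldl_append_singleton_eq_map, PySem.List.pyRange_zero_natCast,
    List.nil_append, List.map_map]
  simp only []
  have hmap : (List.range k).map (pvQI ∘ fun j : Nat => (j : Int)) = (List.range k).map pvQ :=
    List.map_congr_left (fun j _ => pvQI_cast j)
  rw [hmap, PySem.List.slice_to _ (by positivity), Int.toNat_natCast]

lemma pvBlock_eq (c : Nat) :
    (pvBaseQuestions.map (fun q =>
      if (c : Int) == 0 then q else q ++ " (Variation " ++ PySem.Int.toStr (c : Int) ++ ")"))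
    = (List.range 20).map (fun j => pvQ (20 * c + j)) := by
  apply List.ext_getElem
  · simp [pvLen]
  · intro j hj1 hj2
    have hj : j < 20 := by simpa using hj2
    have hjlen : j < pvBaseQuestions.length := by rw [pvLen]; exact hj
    have hmod : (20 * c + j) % 20 = j := by omega
    have hdiv : (20 * c + j) / 20 = c := by
      rw [Nat.mul_add_div (by norm_num), Nat.div_eq_of_lt hj]; omega
    rw [List.getElem_map, List.getElem_map, List.getElem_range]
    simp only [pvQ, hmod, hdiv, List.getD_eq_getElem?_getD,
      List.getElem?_eq_getElem hjlen, Option.getD_some]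
    rcases Nat.eq_zero_or_pos c with hc | hc
    · subst hc
      rw [if_pos (by decide), if_neg (by omega)]
    · rw [if_neg (by simp; omega), if_pos (by omega)]

lemma pvBlocks_eq (m : Nat) :
    (((List.range m).map (fun c : Nat => (c : Int))).flatMap (fun c =>
      pvBaseQuestions.map (fun q =>
        if c == 0 then q else q ++ " (Variation " ++ PySem.Int.toStr c ++ ")")))
    = (List.range (20 * m)).map pvQ := by
  induction m with
  | zero => simp
  | succ m ih =>
    rw [List.range_succ, List.map_append, List.flatMap_append, ih]
    simp only [List.map_cons, List.map_nil, List.flatMap_cons, List.flatMap_nil,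
      List.append_nil]
    rw [pvBlock_eq m, show 20 * (m + 1) = 20 * m + 20 by ring, List.range_add,
      List.map_append, List.map_map]
    rfl

lemma pvB_eq (k : Nat) (hk : 0 < k) :
    generate_sample_questions_alt (k : Int) = List.take k ((List.range k).map pvQ) := by
  unfold generate_sample_questions_alt
  rw [if_neg (by omega)]
  simp only []
  have hlen : ((k : Int) + (pvBaseQuestions.length : Int) - 1) = ((k + 19 : Nat) : Int) := by
    rw [pvLen]; push_cast; ring
  rw [hlen, pvLen, PySem.Int.floordiv_natCast, PySem.List.pyRange_zero_natCast,
    pvBlocks_eq ((k + 19) / 20), PySem.List.slice_to _ (by positivity), Int.toNat_natCast,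
    ← List.map_take, ← List.map_take, List.take_range, List.take_range,
    show min k (20 * ((k + 19) / 20)) = k by omega, min_self]

-- ===== VERDICT (by name: the statement is the Claim_ definition above) =====
theorem generate_sample_questions_spec : Claim_equal_generate_sample_questions := by
  intro count _
  unfold Spec_generate_sample_questions
  by_cases h : count ≤ 0
  · have hA : generate_sample_questions count = [] := by
      unfold generate_sample_questions
      rw [PySem.List.pyRange_one_eq_nil h]
      simp [PySem.List.slice]
    have hB : generate_sample_questions_alt count = [] := by
      unfold generate_sample_questions_alt
      rw [if_pos h]
    rw [hA, hB]
  · have h' : 0 < count := by omega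
    obtain ⟨k, hk⟩ : ∃ k : Nat, count = (k : Int) := ⟨count.toNat, (Int.toNat_of_nonneg h'.le).symm⟩
    subst hk
    rw [pvA_eq, pvB_eq k (by exact_mod_cast h')]
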